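-- pv_equiv track=rewrite | github.com/a-ws-m/nokamute | python/pretrain/human_games.py | normalize_move_string
-- ===== SOURCE A (Python) =====
-- def normalize_move_string(move_str: str) -> str:
--     """
--     Normalize a move string to handle variations in notation.
--
--     Some game logs include bug numbers (e.g., 'wL1') even for bugs that only
--     have one piece (Queen, Ladybug, Mosquito, Pillbug). This function removes
--     the '1' suffix for single-piece bugs.
--
--     Args:
--         move_str: Move string to normalize
--
--     Returns:
--         Normalized move string
--     """
--     # Bugs that only have one piece don't need a number
--     single_piece_bugs = ['Q', 'L', 'M', 'P']
--
--     # Split the move into parts (e.g., "wB2 bM1" -> ["wB2", "bM1"])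
--     parts = move_str.split()
--     normalized_parts = []
--
--     for part in parts:
--         # Check if this is a piece reference (starts with color)
--         if len(part) >= 3 and part[0] in ['w', 'b']:
--             bug_type = part[1]
--
--             # If it's a single-piece bug and has '1' as the third character, remove it
--             if bug_type in single_piece_bugs and len(part) > 2 and part[2] == '1':
--                 # Remove the '1' and keep the rest (e.g., 'wL1' -> 'wL', 'bM1' -> 'bM')
--                 # But preserve any direction markers or other suffixes
--                 normalized_parts.append(part[0:2] + part[3:])
--             else:
--                 normalized_parts.append(part)
--         else:
--             # Not a piece reference, keep as-is (could be a direction marker or standalone piece)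
--             normalized_parts.append(part)
--
--     return ' '.join(normalized_parts)
-- ===== SOURCE B (Python) =====
-- def normalize_move_string(move_str: str) -> str:
--     """Single streaming pass over the characters: no token list is built.
--
--     Tracks the position within the current token; the '1' at token index 2
--     is dropped when the token starts with w/b followed by Q/L/M/P.
--     """
--     out = []
--     pos = -1          # index within current token; -1 = between tokens
--     c0 = c1 = ' '     # first two characters of the current token
--     for ch in move_str:
--         if ch.isspace():
--             pos = -1
--             continue
--         if pos == -1:
--             if out:
--                 out.append(' ')
--             pos = 0
--         if pos == 0:
--             c0 = ch
--         elif pos == 1: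
--             c1 = ch
--         elif pos == 2 and ch == '1' and (c0 == 'w' or c0 == 'b') \
--                 and (c1 == 'Q' or c1 == 'L' or c1 == 'M' or c1 == 'P'):
--             pos = 3
--             continue
--         out.append(ch)
--         pos += 1
--     return ''.join(out)
-- ===== Notes on version B (the rewrite author's own statement) =====
-- stated objective: alternative
-- what changed: A splits the string into a token list and rebuilds it with a per-token loop plus join; B makes a single streaming pass over the characters with a position-in-token state machine, never materialising a token list.
import Mathlib
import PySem

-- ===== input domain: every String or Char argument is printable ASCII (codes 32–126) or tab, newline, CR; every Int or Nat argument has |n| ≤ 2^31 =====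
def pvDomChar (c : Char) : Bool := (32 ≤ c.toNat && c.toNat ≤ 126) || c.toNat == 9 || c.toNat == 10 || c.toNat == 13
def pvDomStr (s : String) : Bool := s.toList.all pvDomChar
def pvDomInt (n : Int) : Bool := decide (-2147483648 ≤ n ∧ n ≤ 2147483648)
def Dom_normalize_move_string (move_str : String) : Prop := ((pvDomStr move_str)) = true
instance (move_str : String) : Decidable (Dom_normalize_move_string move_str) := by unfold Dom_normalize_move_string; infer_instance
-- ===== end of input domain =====

-- B replaces A's split-into-token-list loop by a single streaming character pass
-- (position-in-token state machine); objective: alternative decomposition, same cost.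


-- ===== PORT A =====
-- per-token body of A's for-loop (part : one whitespace-separated token, as chars)
def pvNormPartA (part : List Char) : List Char :=
  if 3 ≤ part.length ∧
      (PySem.List.pyGetD part 0 ' ' = 'w' ∨ PySem.List.pyGetD part 0 ' ' = 'b') then
    let bug_type := PySem.List.pyGetD part 1 ' '
    if (bug_type = 'Q' ∨ bug_type = 'L' ∨ bug_type = 'M' ∨ bug_type = 'P') ∧
        2 < part.length ∧ PySem.List.pyGetD part 2 ' ' = '1' then
      PySem.List.slice part (some 0) (some 2) ++ PySem.List.slice part (some 3) none
    else part
  else part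

def normalize_move_string (move_str : String) : String :=
  let parts := PySem.Chars.split₀ move_str.toList
  let normalized_parts := parts.foldl (fun acc part => acc ++ [pvNormPartA part]) []
  String.ofList (PySem.Chars.join [' '] normalized_parts)

-- ===== PORT B =====
-- streaming state: (out, pos in current token (-1 = between tokens), first char, second char)
def pvStepB (st : List Char × Int × Char × Char) (ch : Char) :
    List Char × Int × Char × Char :=
  let (out, pos, c0, c1) := st
  if PySem.Chars.isspace ch then (out, -1, c0, c1)
  else
    let out := if pos = -1 ∧ ¬ out.isEmpty then out ++ [' '] else out
    let pos := if pos = -1 then 0 else pos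
    if pos = 0 then (out ++ [ch], 1, ch, c1)
    else if pos = 1 then (out ++ [ch], 2, c0, ch)
    else if pos = 2 ∧ ch = '1' ∧ (c0 = 'w' ∨ c0 = 'b') ∧
        (c1 = 'Q' ∨ c1 = 'L' ∨ c1 = 'M' ∨ c1 = 'P') then (out, 3, c0, c1)
    else (out ++ [ch], pos + 1, c0, c1)

def normalize_move_string_alt (move_str : String) : String :=
  String.ofList (move_str.toList.foldl pvStepB ([], -1, ' ', ' ')).1

-- ===== PRECONDITION & SPEC =====
def Spec_normalize_move_string (move_str : String) (out : String) : Prop := out = normalize_move_string_alt move_str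
instance (move_str : String) (out : String) : Decidable (Spec_normalize_move_string move_str out) := by unfold Spec_normalize_move_string; infer_instance

-- ===== CLAIM (what is proved, stated in full; the proofs are below) =====
def Claim_equal_normalize_move_string : Prop := ∀ (move_str : String), Dom_normalize_move_string move_str → Spec_normalize_move_string move_str (normalize_move_string move_str)

-- ===== LEMMAS AND PROOFS =====

-- the common per-token transform both programs implement
def pvF (part : List Char) : List Char :=
  match part with
  | a :: b :: c :: rest =>
      if c = '1' ∧ (a = 'w' ∨ a = 'b') ∧ (b = 'Q' ∨ b = 'L' ∨ b = 'M' ∨ b = 'P') then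
        a :: b :: rest
      else part
  | _ => part

-- whitespace-separated tokens, as a structural recursion
def pvWords : List Char → List (List Char)
  | [] => []
  | c :: cs =>
      if PySem.Chars.isspace c then pvWords cs
      else (c :: cs.takeWhile (fun d => !PySem.Chars.isspace d)) ::
            pvWords (cs.dropWhile (fun d => !PySem.Chars.isspace d))
  termination_by cs => cs.length
  decreasing_by
    · simp
    · have := List.length_dropWhile_le (fun d => !PySem.Chars.isspace d) cs
      simp; omega

def pvT (ts : List (List Char)) : List Char := ts.flatMap (fun t => ' ' :: pvF t)

theorem pvNormPartA_eq_pvF (part : List Char) : pvNormPartA part = pvF part := by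
  match part with
  | [] => rfl
  | [a] => simp [pvNormPartA, pvF]
  | [a, b] => simp [pvNormPartA, pvF]
  | a :: b :: c :: rest =>
      have g0 : PySem.List.pyGetD (a :: b :: c :: rest) 0 ' ' = a := by simp [pysem]
      have g1 : PySem.List.pyGetD (a :: b :: c :: rest) 1 ' ' = b := by simp [pysem]
      have g2 : PySem.List.pyGetD (a :: b :: c :: rest) 2 ' ' = c := by simp [pysem]
      have s1 : PySem.List.slice (a :: b :: c :: rest) (some 0) (some 2) = [a, b] := by
        simp [pysem, PySem.List.slice]
      have s2 : PySem.List.slice (a :: b :: c :: rest) (some 3) none = rest := by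
        simp [pysem, PySem.List.slice]
      have hl : (3:Nat) ≤ (a :: b :: c :: rest).length := by simp
      have hl2 : (2:Nat) < (a :: b :: c :: rest).length := by simp
      simp only [pvNormPartA, pvF, g0, g1, g2, s1, s2]
      by_cases houter : a = 'w' ∨ a = 'b'
      · by_cases hc : c = '1' ∧ (b = 'Q' ∨ b = 'L' ∨ b = 'M' ∨ b = 'P')
        · rw [if_pos ⟨hl, houter⟩, if_pos ⟨hc.2, hl2, hc.1⟩, if_pos ⟨hc.1, houter, hc.2⟩]
          simp
        · rw [if_pos ⟨hl, houter⟩, if_neg (by tauto), if_neg (by tauto)]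
      · rw [if_neg (by tauto), if_neg (by tauto)]

theorem split₀_go_eq (cs : List Char) : ∀ cur acc,
    PySem.Chars.split₀.go cs cur acc =
      acc.reverse ++ (if cur = [] then pvWords cs
        else (cur.reverse ++ cs.takeWhile (fun d => !PySem.Chars.isspace d)) ::
              pvWords (cs.dropWhile (fun d => !PySem.Chars.isspace d))) := by
  induction cs with
  | nil => intro cur acc
           by_cases h : cur = [] <;>
             simp [PySem.Chars.split₀.go, pvWords, h, List.isEmpty_iff]
  | cons c rest ih =>
      intro cur acc
      by_cases hs : PySem.Chars.isspace c
      · by_cases h : cur = []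
        · rw [pvWords]
          simp [PySem.Chars.split₀.go, hs, h, ih]
        · have hw : pvWords (c :: rest) = pvWords rest := by rw [pvWords]; simp [hs]
          simp [PySem.Chars.split₀.go, hs, h, ih, hw]
      · by_cases h : cur = []
        · rw [pvWords]
          simp [PySem.Chars.split₀.go, hs, h, ih]
        · rw [pvWords]
          simp [PySem.Chars.split₀.go, hs, h, ih]

theorem split₀_eq_pvWords (cs : List Char) : PySem.Chars.split₀ cs = pvWords cs := by
  simpa [PySem.Chars.split₀] using split₀_go_eq cs [] []

theorem join_map_pvF (ts : List (List Char)) :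
    PySem.Chars.join [' '] (ts.map pvF) =
      match ts with
      | [] => []
      | t :: ts' => pvF t ++ pvT ts' := by
  match ts with
  | [] => rfl
  | t :: ts' =>
    induction ts' generalizing t with
    | nil => simp [PySem.Chars.join_singleton, pvT]
    | cons u us ih =>
        simp only [List.map_cons, PySem.Chars.join_cons_cons]
        have := ih u
        simp only [List.map_cons] at this
        simp [this, pvT]

-- from pos ≥ 3, B's machine just copies nonspace characters
theorem runB_high (rest : List Char) : ∀ out (p : Int) c0 c1,
    (∀ c ∈ rest, PySem.Chars.isspace c = false) → 3 ≤ p →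
    rest.foldl pvStepB (out, p, c0, c1) = (out ++ rest, p + rest.length, c0, c1) := by
  induction rest with
  | nil => intro out p c0 c1 _ _; simp
  | cons ch rest ih =>
      intro out p c0 c1 hns hp
      have hch : PySem.Chars.isspace ch = false := hns ch (by simp)
      have hstep : pvStepB (out, p, c0, c1) ch = (out ++ [ch], p + 1, c0, c1) := by
        simp [pvStepB, hch, show ¬ p = -1 by omega, show ¬ p = 0 by omega,
          show ¬ p = 1 by omega, show ¬ p = 2 by omega]
      rw [List.foldl_cons, hstep, ih _ _ _ _ (fun c hc => hns c (by simp [hc])) (by omega)]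
      simp
      omega

theorem pvF_ne_nil (a : Char) (t : List Char) : pvF (a :: t) ≠ [] := by
  match t with
  | [] => simp [pvF]
  | [b] => simp [pvF]
  | b :: c :: r => simp only [pvF]; split_ifs <;> simp

-- running B's machine over one whole token from the between-tokens state
theorem token_run (a : Char) (t : List Char)
    (hns : ∀ c ∈ a :: t, PySem.Chars.isspace c = false) (out : List Char) (c0 c1 : Char) :
    ∃ p c0' c1', 1 ≤ p ∧
      (a :: t).foldl pvStepB (out, -1, c0, c1) =
        ((if out = [] then [] else out ++ [' ']) ++ pvF (a :: t), p, c0', c1') := by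
  have ha : PySem.Chars.isspace a = false := hns a (by simp)
  have hout : (if (-1 : Int) = -1 ∧ ¬ out.isEmpty then out ++ [' '] else out)
      = (if out = [] then [] else out ++ [' ']) := by
    by_cases h : out = [] <;> simp [h]
  match t with
  | [] =>
      refine ⟨1, a, c1, le_refl 1, ?_⟩
      simp only [List.foldl_cons, List.foldl_nil, pvStepB, ha]
      simp only [Bool.false_eq_true, if_false]
      by_cases h : out = [] <;> simp [pvF, h]
  | [b] =>
      have hb : PySem.Chars.isspace b = false := hns b (by simp)
      refine ⟨2, a, b, by omega, ?_⟩
      simp only [List.foldl_cons, List.foldl_nil, pvStepB, ha, hb]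
      simp only [Bool.false_eq_true, if_false]
      by_cases h : out = [] <;> simp [pvF, h]
  | b :: c :: rest =>
      have hb : PySem.Chars.isspace b = false := hns b (by simp)
      have hc : PySem.Chars.isspace c = false := hns c (by simp)
      have hrest : ∀ d ∈ rest, PySem.Chars.isspace d = false :=
        fun d hd => hns d (by simp [hd])
      refine ⟨3 + rest.length, a, b, by omega, ?_⟩
      set out' := (if out = [] then [] else out ++ [' ']) with hout'
      have step1 : pvStepB (out, -1, c0, c1) a = (out' ++ [a], 1, a, c1) := by
        simp only [pvStepB, ha]
        by_cases h : out = [] <;> simp [hout', h]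
      have step2 : pvStepB (out' ++ [a], 1, a, c1) b = (out' ++ [a, b], 2, a, b) := by
        simp [pvStepB, hb]
      by_cases hcond : c = '1' ∧ (a = 'w' ∨ a = 'b') ∧ (b = 'Q' ∨ b = 'L' ∨ b = 'M' ∨ b = 'P')
      · have step3 : pvStepB (out' ++ [a, b], 2, a, b) c = (out' ++ [a, b], 3, a, b) := by
          simp only [pvStepB, hc]
          simp [hcond]
        rw [List.foldl_cons, step1, List.foldl_cons, step2, List.foldl_cons, step3,
          runB_high rest _ 3 a b hrest (by omega)]
        simp [pvF, hcond]
      · have step3 : pvStepB (out' ++ [a, b], 2, a, b) c = (out' ++ [a, b, c], 3, a, b) := by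
          simp only [pvStepB, hc]
          simp [hcond]
        rw [List.foldl_cons, step1, List.foldl_cons, step2, List.foldl_cons, step3,
          runB_high rest _ 3 a b hrest (by omega)]
        simp [pvF, hcond]

-- B's main invariant: the streaming pass computes the joined normalized tokens
theorem runB_main (n : Nat) : ∀ cs : List Char, cs.length ≤ n → ∀ out c0 c1,
    (cs.foldl pvStepB (out, -1, c0, c1)).1 =
      out ++ (if out = [] then
          (match pvWords cs with | [] => [] | t :: ts' => pvF t ++ pvT ts')
        else pvT (pvWords cs)) := by
  induction n with
  | zero =>
      intro cs hlen out c0 c1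
      have : cs = [] := List.length_eq_zero_iff.mp (by omega)
      subst this
      by_cases h : out = [] <;> simp [pvWords, pvT, h]
  | succ n ih =>
      intro cs hlen out c0 c1
      match cs with
      | [] => by_cases h : out = [] <;> simp [pvWords, pvT, h]
      | c :: cs' =>
          by_cases hs : PySem.Chars.isspace c
          · have hw : pvWords (c :: cs') = pvWords cs' := by rw [pvWords]; simp [hs]
            have hstep : pvStepB (out, -1, c0, c1) c = (out, -1, c0, c1) := by
              simp [pvStepB, hs]
            rw [List.foldl_cons, hstep, ih cs' (by simpa using hlen) out c0 c1, hw]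
          · set tw := cs'.takeWhile (fun d => !PySem.Chars.isspace d) with htw
            set dw := cs'.dropWhile (fun d => !PySem.Chars.isspace d) with hdw
            have hsplit : c :: cs' = (c :: tw) ++ dw := by
              simp [htw, hdw, List.takeWhile_append_dropWhile]
            have hlen2 : tw.length + dw.length = cs'.length := by
              conv_rhs => rw [← List.takeWhile_append_dropWhile
                (p := fun d => !PySem.Chars.isspace d) (l := cs')]
              rw [List.length_append]
            have htokns : ∀ d ∈ c :: tw, PySem.Chars.isspace d = false := by
              intro d hd
              rcases List.mem_cons.mp hd with rfl | hd
              · simpa using hs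
              · have := List.mem_takeWhile_imp (htw ▸ hd)
                simpa using this
            have hwords : pvWords (c :: cs') = (c :: tw) :: pvWords dw := by
              rw [pvWords]; simp [hs, htw, hdw]
            obtain ⟨p, c0', c1', hp, hrun⟩ := token_run c tw htokns out c0 c1
            conv_lhs => rw [hsplit]
            rw [List.foldl_append, hrun]
            set O := (if out = [] then [] else out ++ [' ']) ++ pvF (c :: tw) with hO
            have hOne : O ≠ [] := by
              simp only [hO]
              intro h
              exact pvF_ne_nil c tw (List.append_eq_nil_iff.mp h).2
            match hdweq : dw with
            | [] =>
                have hnil : pvWords ([] : List Char) = [] := by rw [pvWords]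
                simp only [List.foldl_nil, hwords, hnil]
                by_cases h : out = [] <;> simp [h, hO, pvT]
            | d :: dw' =>
                have hd : PySem.Chars.isspace d = true := by
                  have := List.head_dropWhile_not (p := fun d => !PySem.Chars.isspace d)
                    (l := cs')
                  rw [← hdw] at this
                  simpa using this (by simp)
                have hstep : pvStepB (O, p, c0', c1') d = (O, -1, c0', c1') := by
                  simp [pvStepB, hd]
                have hlen3 : dw'.length ≤ n := by
                  have h1 : (c :: cs').length ≤ n + 1 := hlen
                  simp at h1
                  simp at hlen2
                  omega
                have hwdw : pvWords (d :: dw') = pvWords dw' := by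
                  rw [pvWords]; simp [hd]
                rw [List.foldl_cons, hstep, ih dw' hlen3 O c0' c1']
                simp only [if_neg hOne, hwords, hwdw]
                by_cases h : out = [] <;> simp [h, hO, pvT]

-- ===== VERDICT (by name: the statement is the Claim_ definition above) =====
theorem normalize_move_string_spec : Claim_equal_normalize_move_string := by
  intro s _
  unfold Spec_normalize_move_string normalize_move_string normalize_move_string_alt
  simp only []
  have hA : (PySem.Chars.split₀ s.toList).foldl
      (fun acc part => acc ++ [pvNormPartA part]) [] = (pvWords s.toList).map pvF := by
    rw [PySem.List.foldl_append_singleton_eq_map, split₀_eq_pvWords]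
    exact List.map_congr_left (fun x _ => pvNormPartA_eq_pvF x)
  have hB := runB_main s.toList.length s.toList (le_refl _) [] ' ' ' '
  simp only [if_true, List.nil_append] at hB
  rw [hA, join_map_pvF, hB]
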